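-- pv_equiv track=rewrite | github.com/michaelwang0213/CS-143 | git/Project1/SearchEngine/SearchEngine/search.py | getValidPageTurns
-- ===== SOURCE A (Python) =====
-- import math
--
-- def getValidPageTurns(num_results, page_num):
--     valid_page_nums = []
--     prev_valid = False
--     next_valid = False
--     num_pages = math.ceil(num_results / 20)
--     if(num_pages > page_num):
--         next_valid = True
--     if(page_num > 1):
--         prev_valid = True
--
--     i = 0
--     j = -5
--     while j < 11 and i < 11 and page_num + j <= num_pages:
--         if page_num + j > 0 and page_num + j <= num_pages:
--             valid_page_nums.append([page_num + j, j])
--             i += 1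
--         j += 1
--
--     return prev_valid, next_valid, valid_page_nums
-- ===== SOURCE B (Python) =====
-- def _pages(p, lo, page_num, acc):
--     # build the page list back-to-front, prepending as we descend from p to lo
--     if p < lo:
--         return acc
--     return _pages(p - 1, lo, page_num, [[p, p - page_num]] + acc)
--
-- def getValidPageTurns(num_results, page_num):
--     num_pages = -(-num_results // 20)          # exact integer ceiling, no float
--     lo = max(1, page_num - 5)
--     hi = min(num_pages, page_num + 10, lo + 10)  # three-way clamp absorbs the 11-item cap
--     return page_num > 1, num_pages > page_num, _pages(hi, lo, page_num, [])
-- ===== Notes on version B (the rewrite author's own statement) =====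
-- stated objective: alternative
-- what changed: Replaced A's forward guarded offset-counting while loop (counters i,j with per-element validity tests and an 11-item cap) by a closed-form three-way clamp of the window endpoints followed by a recursive helper that builds the page list back-to-front by prepending, with no per-element guards, cap or slice, and an exact integer ceiling instead of math.ceil on a float.
import Mathlib
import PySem

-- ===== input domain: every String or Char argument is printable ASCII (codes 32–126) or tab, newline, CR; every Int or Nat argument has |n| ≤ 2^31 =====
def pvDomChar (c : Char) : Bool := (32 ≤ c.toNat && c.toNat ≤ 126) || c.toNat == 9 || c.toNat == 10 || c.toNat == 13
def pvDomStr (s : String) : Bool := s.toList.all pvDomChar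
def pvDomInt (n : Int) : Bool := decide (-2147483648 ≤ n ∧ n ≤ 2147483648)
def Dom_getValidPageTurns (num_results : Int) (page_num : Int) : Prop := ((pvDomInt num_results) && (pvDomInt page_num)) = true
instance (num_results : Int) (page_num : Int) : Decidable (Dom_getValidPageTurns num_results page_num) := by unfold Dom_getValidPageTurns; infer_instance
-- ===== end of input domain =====

-- B clamps the window endpoints in closed form (a three-way min absorbs the 11-item cap) and
-- builds the page list back-to-front by a prepending recursion — no per-element guards or counters.

-- ===== PORT A =====
-- math.ceil(num_results / 20): for |num_results| ≤ 2^31 the float division is exact enough that the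
-- ceiling equals the exact integer ceiling, ⌈n/20⌉ = -((-n) // 20).
def pvCeilDiv20 (n : Int) : Int := -(PySem.Int.floordiv (-n) 20)

-- the while loop of A, step for step; terminates because j strictly increases towards the bound 11
def pvLoopA (num_pages page_num : Int) (i j : Int) (acc : List (List Int)) : List (List Int) :=
  if h : j < 11 ∧ i < 11 ∧ page_num + j ≤ num_pages then
    if page_num + j > 0 ∧ page_num + j ≤ num_pages then
      pvLoopA num_pages page_num (i + 1) (j + 1) (acc ++ [[page_num + j, j]])
    else
      pvLoopA num_pages page_num i (j + 1) acc
  else acc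
termination_by (11 - j).toNat
decreasing_by all_goals (omega)

def getValidPageTurns (num_results : Int) (page_num : Int) : Bool × Bool × List (List Int) :=
  let num_pages := pvCeilDiv20 num_results
  let next_valid := if num_pages > page_num then true else false
  let prev_valid := if page_num > 1 then true else false
  (prev_valid, next_valid, pvLoopA num_pages page_num 0 (-5) [])

-- ===== PORT B =====
-- Source B's _pages: descend from p to lo, prepending [p, p - page_num]
def pvPagesB (lo page_num : Int) (p : Int) (acc : List (List Int)) : List (List Int) :=
  if p < lo then acc
  else pvPagesB lo page_num (p - 1) ([[p, p - page_num]] ++ acc)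
termination_by (p - lo + 1).toNat
decreasing_by omega

def getValidPageTurns_alt (num_results : Int) (page_num : Int) : Bool × Bool × List (List Int) :=
  let num_pages := -(PySem.Int.floordiv (-num_results) 20)
  let lo := max 1 (page_num - 5)
  let hi := min (min num_pages (page_num + 10)) (lo + 10)
  (decide (page_num > 1), decide (num_pages > page_num), pvPagesB lo page_num hi [])

-- ===== PRECONDITION & SPEC =====
def Spec_getValidPageTurns (num_results : Int) (page_num : Int) (out : Bool × Bool × List (List Int)) : Prop := out = getValidPageTurns_alt num_results page_num
instance (num_results : Int) (page_num : Int) (out : Bool × Bool × List (List Int)) : Decidable (Spec_getValidPageTurns num_results page_num out) := by unfold Spec_getValidPageTurns; infer_instance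

-- ===== CLAIM (what is proved, stated in full; the proofs are below) =====
def Claim_equal_getValidPageTurns : Prop := ∀ (num_results : Int) (page_num : Int), Dom_getValidPageTurns num_results page_num → Spec_getValidPageTurns num_results page_num (getValidPageTurns num_results page_num)

-- ===== LEMMAS AND PROOFS =====

-- the window of loop positions j' still to be emitted when A's loop is at position j
def pvWindow (num_pages page_num j : Int) : List (List Int) :=
  (PySem.List.pyRange (max j (1 - page_num)) (min 11 (num_pages - page_num + 1)) 1).map
    (fun j' => [page_num + j', j'])

theorem pvLoopA_eq_window (num_pages page_num : Int) :
    ∀ (j i : Int) (acc : List (List Int)),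
      pvLoopA num_pages page_num i j acc =
        acc ++ (pvWindow num_pages page_num j).take (11 - i).toNat := by
  intro j i acc
  fun_induction pvLoopA num_pages page_num i j acc with
  | case1 i j acc h hin ih =>
    rw [ih]
    have hw : pvWindow num_pages page_num j =
        [page_num + j, j] :: pvWindow num_pages page_num (j + 1) := by
      unfold pvWindow
      rw [max_eq_left (by omega), max_eq_left (by omega),
        PySem.List.pyRange_one_cons (by omega)]
      simp
    have ht : (11 - i).toNat = (11 - (i + 1)).toNat + 1 := by omega
    rw [hw, ht, List.take_succ_cons]
    simp
  | case2 i j acc h hin ih =>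
    rw [ih]
    have hw : pvWindow num_pages page_num (j + 1) = pvWindow num_pages page_num j := by
      unfold pvWindow
      rw [max_eq_right (by omega), max_eq_right (by omega)]
    rw [hw]
  | case3 i j acc h =>
    by_cases hi : i < 11
    · have hw : pvWindow num_pages page_num j = [] := by
        unfold pvWindow
        rw [PySem.List.pyRange_one_eq_nil (by omega)]
        simp
      rw [hw]; simp
    · have : (11 - i).toNat = 0 := by omega
      rw [this]; simp

-- B's prepending recursion emits exactly the pages lo..p in ascending order
theorem pvPagesB_eq (lo pn : Int) :
    ∀ (p : Int) (acc : List (List Int)),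
      pvPagesB lo pn p acc =
        ((PySem.List.pyRange lo (p + 1) 1).map (fun q => [q, q - pn])) ++ acc := by
  intro p acc
  fun_induction pvPagesB lo pn p acc with
  | case1 p acc h =>
    rw [PySem.List.pyRange_one_eq_nil (by omega)]; simp
  | case2 p acc h ih =>
    rw [ih]
    have : p - 1 + 1 = p := by ring
    rw [this, PySem.List.pyRange_one_succ_right (by omega)]
    simp

-- taking k elements of an integer range truncates its upper bound
theorem pvRange_take (a b : Int) (k : Nat) :
    (PySem.List.pyRange a b 1).take k = PySem.List.pyRange a (min b (a + k)) 1 := by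
  have h : min k (b - a).toNat = (min b (a + (k : Int)) - a).toNat := by omega
  simp only [PySem.List.pyRange_one, ← List.map_take, List.take_range, h]

theorem pvRange_shift (a b c : Int) :
    PySem.List.pyRange (a + c) (b + c) 1 = (PySem.List.pyRange a b 1).map (· + c) := by
  have h : b + c - (a + c) = b - a := by ring
  simp only [PySem.List.pyRange_one, h, List.map_map]
  refine List.map_congr_left ?_
  intro k _
  simp; ring

-- ===== VERDICT =====
theorem getValidPageTurns_spec : Claim_equal_getValidPageTurns := by
  intro n p _
  unfold Spec_getValidPageTurns getValidPageTurns getValidPageTurns_alt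
  set np := pvCeilDiv20 n with hnp
  have hnp' : -(PySem.Int.floordiv (-n) 20) = np := rfl
  rw [hnp']
  refine Prod.ext ?_ (Prod.ext ?_ ?_)
  · by_cases h : p > 1 <;> simp [h]
  · by_cases h : np > p <;> simp [h]
  · show pvLoopA np p 0 (-5) [] =
      pvPagesB (max 1 (p - 5)) p (min (min np (p + 10)) (max 1 (p - 5) + 10)) []
    rw [pvLoopA_eq_window, pvPagesB_eq]
    unfold pvWindow
    simp only [List.nil_append, List.append_nil]
    rw [show ((11 : Int) - 0).toNat = 11 from rfl, ← List.map_take, pvRange_take]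
    have h1 : min (min np (p + 10)) (max 1 (p - 5) + 10) + 1 =
        min (min 11 (np - p + 1)) (max (-5) (1 - p) + 11) + p := by omega
    have h2 : max 1 (p - 5) = max (-5) (1 - p) + p := by omega
    rw [h1, h2, pvRange_shift, List.map_map]
    have hf : ((fun q => [q, q - p]) ∘ (· + p)) = (fun j : Int => [p + j, j]) := by
      funext j; simp; ring
    rw [hf]
    norm_num
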